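-- pv_equiv track=rewrite | github.com/allanAHSolution/TilbudsMaskine | app.py | _anvend_lokale_tags
-- ===== SOURCE A (Python) =====
-- def _anvend_lokale_tags(entries, tags, projekt_map=None):
--     """
--     Lægger lokale ERP-tags oven på entries. Prioritet:
--       1. Lokal tag (dinero_bilag_tags.json)
--       2. Kode i tekst (PROJ-XXX / INT-XXX)
--       3. Fallback: match på site/kunde-navn fra vundne projekter
--     """
--     for e in entries:
--         guid = e.get('entry_guid')
--         if guid and guid in tags:
--             e['project_code'] = tags[guid].get('code')
--             e['tag_source']   = 'local'
--             e['tag_note']     = tags[guid].get('note', '')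
--         elif e.get('project_code'):
--             e['tag_source'] = 'dinero'
--         elif projekt_map:
--             match = _match_paa_navn(e.get('description', ''), projekt_map)
--             if match:
--                 e['project_code'] = match
--                 e['tag_source']   = 'navn'
--             else:
--                 e['tag_source'] = None
--         else:
--             e['tag_source'] = None
--     return entries
--
-- def _match_paa_navn(desc, projekt_map):
--     """
--     Fallback matching: hvis ingen kode, prøv at matche på site eller
--     kunde-navn. Returnerer PROJ-XXX hvis ét entydigt match, ellers None.
--     """
--     if not desc:
--         return None
--     low = desc.lower()
--     # Prioriter site-navn (mere specifikt end kunde)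
--     site_hits = [code for code, info in projekt_map.items()
--                  if info.get('site') and len(info['site'].strip()) >= 4
--                  and info['site'].strip().lower() in low]
--     if len(site_hits) == 1:
--         return site_hits[0]
--     # Fallback til kundenavn
--     kunde_hits = [code for code, info in projekt_map.items()
--                   if info.get('kunde') and len(info['kunde'].strip()) >= 4
--                   and info['kunde'].strip().lower() in low]
--     if len(kunde_hits) == 1:
--         return kunde_hits[0]
--     return None
-- ===== SOURCE B (Python) =====
-- def _anvend_lokale_tags(entries, tags, projekt_map=None):
--     # Staged, loop-inverted re-implementation: pass 1 classifies entries and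
--     # collects the unresolved ones; then two name-major counting passes (one
--     # scan per qualifying project name over all pending descriptions) replace
--     # the per-entry hit-list comprehensions; a final zip resolves the tiers.
--     pending = []  # (entry, lowered description) for fallback candidates
--     for e in entries:
--         guid = e.get('entry_guid')
--         if guid and guid in tags:
--             e['project_code'] = tags[guid].get('code')
--             e['tag_source'] = 'local'
--             e['tag_note'] = tags[guid].get('note', '')
--         elif e.get('project_code'):
--             e['tag_source'] = 'dinero'
--         elif projekt_map:
--             desc = e.get('description', '')
--             if desc:
--                 pending.append((e, desc.lower()))
--             else:
--                 e['tag_source'] = None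
--         else:
--             e['tag_source'] = None
--     if pending:
--         site = _tael_hits(pending, projekt_map, 'site')
--         kunde = _tael_hits(pending, projekt_map, 'kunde')
--         for (e, _), (sc, scode), (kc, kcode) in zip(pending, site, kunde):
--             code = scode if sc == 1 else (kcode if kc == 1 else None)
--             if code:
--                 e['project_code'] = code
--                 e['tag_source'] = 'navn'
--             else:
--                 e['tag_source'] = None
--     return entries
--
-- def _tael_hits(pending, projekt_map, key):
--     # Inverted scan: for each qualifying project name, sweep every pending
--     # description once, maintaining (hit count, last hit code) per entry.
--     hits = [(0, None)] * len(pending)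
--     for code, info in projekt_map.items():
--         name = info.get(key)
--         if not name:
--             continue
--         name = name.strip()
--         if len(name) < 4:
--             continue
--         name = name.lower()
--         hits = [(c + 1, code) if name in low else (c, cd)
--                 for (_, low), (c, cd) in zip(pending, hits)]
--     return hits
-- ===== Notes on version B (the rewrite author's own statement) =====
-- stated objective: alternative
-- what changed: B replaces A's single entry-major loop (which runs the two hit-list comprehensions over all projects for every entry) by staged passes: one classification pass collects the unresolved entries, then two loop-inverted name-major counting passes sweep each qualifying site/kunde name once over all pending descriptions maintaining (hit count, last hit code) per entry, and a final zip resolves the two tiers.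
import Mathlib
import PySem

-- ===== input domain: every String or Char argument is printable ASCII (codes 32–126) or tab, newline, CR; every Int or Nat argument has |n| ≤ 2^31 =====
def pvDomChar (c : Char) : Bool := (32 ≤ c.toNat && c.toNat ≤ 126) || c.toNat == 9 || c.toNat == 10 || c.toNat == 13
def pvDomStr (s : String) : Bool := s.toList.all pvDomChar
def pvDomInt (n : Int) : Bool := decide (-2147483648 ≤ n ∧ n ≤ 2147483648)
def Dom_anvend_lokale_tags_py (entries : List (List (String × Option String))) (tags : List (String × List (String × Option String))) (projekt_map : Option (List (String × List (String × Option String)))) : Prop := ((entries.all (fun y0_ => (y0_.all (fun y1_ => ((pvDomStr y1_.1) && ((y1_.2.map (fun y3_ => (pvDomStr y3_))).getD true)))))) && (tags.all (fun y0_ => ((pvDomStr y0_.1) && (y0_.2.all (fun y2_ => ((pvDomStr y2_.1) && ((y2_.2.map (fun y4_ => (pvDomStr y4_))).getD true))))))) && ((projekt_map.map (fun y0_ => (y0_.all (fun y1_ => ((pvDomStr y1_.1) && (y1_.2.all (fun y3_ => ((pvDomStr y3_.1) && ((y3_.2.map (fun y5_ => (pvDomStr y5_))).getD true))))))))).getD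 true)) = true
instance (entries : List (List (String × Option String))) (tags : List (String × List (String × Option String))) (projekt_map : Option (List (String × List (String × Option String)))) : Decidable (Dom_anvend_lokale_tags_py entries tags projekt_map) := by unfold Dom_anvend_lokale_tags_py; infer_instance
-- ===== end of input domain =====

-- B restructures A into staged passes: a classification pass collects unresolved entries, two
-- loop-inverted name-major counting passes replace A's per-entry hit-list comprehensions, and a
-- final zip resolves the two tiers; both Pythons mutate the entry dicts in place and return the
-- same list — the mutations coincide, and the theorem is about the returned value.


-- ===== PORT A =====
-- shared marshalling helpers (type convention: a Python dict arrives as an assoc list)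
def pvToDict (e : List (String × Option String)) : PySem.Dict String (Option String) :=
  PySem.Dict.ofList e
def pvGetOpt (e : List (String × Option String)) (k : String) : Option String :=
  ((PySem.Dict.ofList e).get? k).getD none      -- e.get(k) on a str -> Optional[str] dict
def pvTruthy : Option String → Bool             -- Python truthiness of an Optional[str]
  | none => false
  | some s => decide (s ≠ "")

-- the condition of A's two list comprehensions in _match_paa_navn
def pvCondA (low : String) (key : String) (p : String × List (String × Option String)) : Bool :=
  match pvGetOpt p.2 key with
  | none => false
  | some s =>
      decide (s ≠ "") && decide (4 ≤ PySem.Str.len (PySem.Str.strip s)) &&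
        PySem.Str.isIn (PySem.Str.lower (PySem.Str.strip s)) low

-- _match_paa_navn(desc, projekt_map), projekt_map passed as its items list
def matchPaaNavnA (desc : Option String) (pmItems : List (String × List (String × Option String))) : Option String :=
  match desc with
  | none => none
  | some ds =>
    if ds = "" then none
    else
      let low := PySem.Str.lower ds
      let siteHits := (pmItems.filter (pvCondA low "site")).map (·.1)
      if siteHits.length = 1 then siteHits.head?
      else
        let kundeHits := (pmItems.filter (pvCondA low "kunde")).map (·.1)
        if kundeHits.length = 1 then kundeHits.head? else none

-- the body of A's `for e in entries` loop (one entry)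
def applyTagA (tagsD : PySem.Dict String (List (String × Option String)))
    (projekt_map : Option (List (String × List (String × Option String))))
    (e : List (String × Option String)) : List (String × Option String) :=
  let d := pvToDict e
  let rest : List (String × Option String) :=
    if pvTruthy ((d.get? "project_code").getD none) then
      (d.insert "tag_source" (some "dinero")).items
    else
      match projekt_map with
      | some pm =>
        let pmD := PySem.Dict.ofList pm
        if pmD.size ≠ 0 then
          let m := matchPaaNavnA ((d.get? "description").getD (some "")) pmD.items
          if pvTruthy m then
            ((d.insert "project_code" m).insert "tag_source" (some "navn")).items
          else (d.insert "tag_source" none).items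
        else (d.insert "tag_source" none).items
      | none => (d.insert "tag_source" none).items
  match (d.get? "entry_guid").getD none with
  | some g =>
      if g ≠ "" ∧ tagsD.contains g then
        let t := PySem.Dict.ofList ((tagsD.get? g).getD [])
        (((d.insert "project_code" ((t.get? "code").getD none)).insert "tag_source"
            (some "local")).insert "tag_note" ((t.get? "note").getD (some ""))).items
      else rest
  | none => rest

def anvend_lokale_tags_py (entries : List (List (String × Option String))) (tags : List (String × List (String × Option String))) (projekt_map : Option (List (String × List (String × Option String)))) : List (List (String × Option String)) :=
  entries.map (applyTagA (PySem.Dict.ofList tags) projekt_map)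

-- ===== PORT B =====
-- B's pass-1 loop body: either a finished entry dict (inl) or a pending
-- (original entry, lowered description) pair appended to `pending` (inr)
def classifyB (tagsD : PySem.Dict String (List (String × Option String)))
    (projekt_map : Option (List (String × List (String × Option String))))
    (e : List (String × Option String)) :
    Sum (List (String × Option String)) (List (String × Option String) × String) :=
  let d := pvToDict e
  let rest : Sum (List (String × Option String)) (List (String × Option String) × String) :=
    if pvTruthy ((d.get? "project_code").getD none) then
      Sum.inl (d.insert "tag_source" (some "dinero")).items
    else
      match projekt_map with
      | some pm =>
        if (PySem.Dict.ofList pm).size ≠ 0 then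
          match (d.get? "description").getD (some "") with
          | some ds =>
            if ds ≠ "" then Sum.inr (e, PySem.Str.lower ds)
            else Sum.inl (d.insert "tag_source" none).items
          | none => Sum.inl (d.insert "tag_source" none).items
        else Sum.inl (d.insert "tag_source" none).items
      | none => Sum.inl (d.insert "tag_source" none).items
  match (d.get? "entry_guid").getD none with
  | some g =>
      if g ≠ "" ∧ tagsD.contains g then
        let t := PySem.Dict.ofList ((tagsD.get? g).getD [])
        Sum.inl (((d.insert "project_code" ((t.get? "code").getD none)).insert "tag_source"
            (some "local")).insert "tag_note" ((t.get? "note").getD (some ""))).items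
      else rest
  | none => rest

-- _tael_hits: name-major inverted scan, one sweep per qualifying project name
-- over all pending descriptions, maintaining (hit count, last hit code) per entry
def taelHitsB (pending : List (List (String × Option String) × String))
    (key : String) : List (String × List (String × Option String)) → List (Nat × Option String) → List (Nat × Option String)
  | [], hits => hits
  | (code, info) :: rest, hits =>
    match pvGetOpt info key with
    | none => taelHitsB pending key rest hits
    | some name =>
      if name = "" then taelHitsB pending key rest hits
      else
        let name2 := PySem.Str.strip name
        if PySem.Str.len name2 < 4 then taelHitsB pending key rest hits
        else
          let name3 := PySem.Str.lower name2
          taelHitsB pending key rest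
            (List.zipWith (fun p h =>
              if PySem.Str.isIn name3 p.2 then (h.1 + 1, some code) else h) pending hits)

-- B's final `for … in zip(pending, site, kunde)` resolution loop
def resolveB : List (List (String × Option String) × String) →
    List (Nat × Option String) → List (Nat × Option String) → List (List (String × Option String))
  | (e, _) :: ps, (sc, scode) :: ss, (kc, kcode) :: ks =>
    let d := pvToDict e
    let code := if sc = 1 then scode else if kc = 1 then kcode else none
    (if pvTruthy code then
      ((d.insert "project_code" code).insert "tag_source" (some "navn")).items
    else (d.insert "tag_source" none).items) :: resolveB ps ss ks
  | _, _, _ => []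

-- splice the resolved pending entries back into their positions
def refillB : List (Sum (List (String × Option String)) (List (String × Option String) × String)) →
    List (List (String × Option String)) → List (List (String × Option String))
  | [], _ => []
  | Sum.inl d :: rest, rs => d :: refillB rest rs
  | Sum.inr _ :: rest, r :: rs => r :: refillB rest rs
  | Sum.inr _ :: rest, [] => refillB rest []      -- unreachable: lengths agree

def anvend_lokale_tags_py_alt (entries : List (List (String × Option String))) (tags : List (String × List (String × Option String))) (projekt_map : Option (List (String × List (String × Option String)))) : List (List (String × Option String)) :=
  let tagsD := PySem.Dict.ofList tags
  let classified := entries.map (classifyB tagsD projekt_map)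
  let pending := classified.filterMap Sum.getRight?
  if pending.isEmpty then refillB classified []
  else
    let items := match projekt_map with
      | some pm => (PySem.Dict.ofList pm).items
      | none => []          -- unreachable: pending nonempty forces a truthy projekt_map
    let init : List (Nat × Option String) := List.replicate pending.length (0, none)
    let site := taelHitsB pending "site" items init
    let kunde := taelHitsB pending "kunde" items init
    refillB classified (resolveB pending site kunde)

-- ===== PRECONDITION & SPEC =====
def Spec_anvend_lokale_tags_py (entries : List (List (String × Option String))) (tags : List (String × List (String × Option String))) (projekt_map : Option (List (String × List (String × Option String)))) (out : List (List (String × Option String))) : Prop := out = anvend_lokale_tags_py_alt entries tags projekt_map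
instance (entries : List (List (String × Option String))) (tags : List (String × List (String × Option String))) (projekt_map : Option (List (String × List (String × Option String)))) (out : List (List (String × Option String))) : Decidable (Spec_anvend_lokale_tags_py entries tags projekt_map out) := by unfold Spec_anvend_lokale_tags_py; infer_instance

-- ===== CLAIM (what is proved, stated in full; the proofs are below) =====
def Claim_equal_anvend_lokale_tags_py : Prop := ∀ (entries : List (List (String × Option String))) (tags : List (String × List (String × Option String))) (projekt_map : Option (List (String × List (String × Option String)))), Dom_anvend_lokale_tags_py entries tags projekt_map → Spec_anvend_lokale_tags_py entries tags projekt_map (anvend_lokale_tags_py entries tags projekt_map)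

-- ===== LEMMAS AND PROOFS =====

-- the per-pending-element fold that taelHitsB computes (loop-interchange target)
def perFold (key : String) (p : List (String × Option String) × String)
    (h : Nat × Option String) : List (String × List (String × Option String)) → Nat × Option String
  | [] => h
  | (code, info) :: rest =>
    match pvGetOpt info key with
    | none => perFold key p h rest
    | some name =>
      if name = "" then perFold key p h rest
      else
        let name2 := PySem.Str.strip name
        if PySem.Str.len name2 < 4 then perFold key p h rest
        else
          perFold key p
            (if PySem.Str.isIn (PySem.Str.lower name2) p.2 then (h.1 + 1, some code) else h) rest

theorem zipWith_zipWith_same {α β : Type} (f g : α → β → β) (ps : List α) (hs : List β) :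
    List.zipWith f ps (List.zipWith g ps hs) = List.zipWith (fun p h => f p (g p h)) ps hs := by
  induction ps generalizing hs with
  | nil => simp
  | cons p ps ih => cases hs <;> simp [List.zipWith, ih]

theorem zipWith_snd_of_length {α β : Type} (ps : List α) (hs : List β)
    (h : hs.length = ps.length) : List.zipWith (fun _ h => h) ps hs = hs := by
  induction ps generalizing hs with
  | nil => cases hs with | nil => rfl | cons a t => simp at h
  | cons p ps ih =>
    cases hs with
    | nil => simp at h
    | cons a t => simp only [List.zipWith]; rw [ih t (by simpa using h)]

-- loop interchange: the name-major scan equals a per-pending-entry fold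
theorem taelHitsB_eq (key : String) (L : List (String × List (String × Option String)))
    (pending : List (List (String × Option String) × String)) (hits : List (Nat × Option String))
    (hlen : hits.length = pending.length) :
    taelHitsB pending key L hits = List.zipWith (fun p h => perFold key p h L) pending hits := by
  induction L generalizing hits with
  | nil => exact (zipWith_snd_of_length pending hits hlen).symm
  | cons hd tl ih =>
    obtain ⟨code, info⟩ := hd
    cases hg : pvGetOpt info key with
    | none =>
      have hu : taelHitsB pending key ((code, info) :: tl) hits = taelHitsB pending key tl hits := by
        simp only [taelHitsB, hg]
      rw [hu, ih hits hlen]; congr 1; funext p h; simp [perFold, hg]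
    | some name =>
      by_cases hn : name = ""
      · have hu : taelHitsB pending key ((code, info) :: tl) hits = taelHitsB pending key tl hits := by
          simp [taelHitsB, hg, hn]
        rw [hu, ih hits hlen]; congr 1; funext p h; simp [perFold, hg, hn]
      · by_cases hl : PySem.Str.len (PySem.Str.strip name) < 4
        · have hu : taelHitsB pending key ((code, info) :: tl) hits = taelHitsB pending key tl hits := by
            simp only [taelHitsB, hg, if_neg hn, if_pos hl]
          rw [hu, ih hits hlen]; congr 1; funext p h
          have hl' : (PySem.Chars.strip name.toList).length < 4 := by simpa using hl
          simp [perFold, hg, hn, hl']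
        · have hu : taelHitsB pending key ((code, info) :: tl) hits =
              taelHitsB pending key tl (List.zipWith (fun p h =>
                if PySem.Str.isIn (PySem.Str.lower (PySem.Str.strip name)) p.2 then (h.1 + 1, some code) else h) pending hits) := by
            simp only [taelHitsB, hg, if_neg hn, if_neg hl]
          rw [hu, ih _ (by simp [hlen]), zipWith_zipWith_same]
          congr 1; funext p h
          have hl' : ¬ (PySem.Chars.strip name.toList).length < 4 := by simpa using hl
          simp [perFold, hg, hn, hl']

theorem zipWith_replicate_right {α β γ : Type} (f : α → β → γ) (ps : List α) (b : β) :
    List.zipWith f ps (List.replicate ps.length b) = ps.map (fun p => f p b) := by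
  induction ps with
  | nil => rfl
  | cons p ps ih => simp [List.replicate, ih]

-- "last hit code" accumulator over a hit list
def lastD (cd : Option String) : List String → Option String
  | [] => cd
  | a :: t => lastD (some a) t

-- perFold computes (count of hits added to the accumulator, last hit code)
theorem perFold_spec (key : String) (p : List (String × Option String) × String)
    (L : List (String × List (String × Option String))) (c : Nat) (cd : Option String) :
    perFold key p (c, cd) L =
      (c + ((L.filter (pvCondA (p.2) key)).map (·.1)).length,
       lastD cd ((L.filter (pvCondA (p.2) key)).map (·.1))) := by
  induction L generalizing c cd with
  | nil => simp [perFold, lastD]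
  | cons hd tl ih =>
    obtain ⟨code, info⟩ := hd
    rw [List.filter_cons]
    cases hg : pvGetOpt info key with
    | none =>
      have hc : pvCondA p.2 key (code, info) = false := by simp [pvCondA, hg]
      have hu : perFold key p (c, cd) ((code, info) :: tl) = perFold key p (c, cd) tl := by
        simp only [perFold, hg]
      simp only [hc, Bool.false_eq_true, if_false, hu]
      exact ih c cd
    | some name =>
      by_cases hn : name = ""
      · have hc : pvCondA p.2 key (code, info) = false := by simp [pvCondA, hg, hn]
        have hu : perFold key p (c, cd) ((code, info) :: tl) = perFold key p (c, cd) tl := by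
          simp [perFold, hg, hn]
        simp only [hc, Bool.false_eq_true, if_false, hu]
        exact ih c cd
      · by_cases hl : PySem.Str.len (PySem.Str.strip name) < 4
        · have h4' : ¬ 4 ≤ (PySem.Chars.strip name.toList).length := by
            have : ¬ 4 ≤ PySem.Str.len (PySem.Str.strip name) := by omega
            simpa using this
          have hc : pvCondA p.2 key (code, info) = false := by simp [pvCondA, hg, h4']
          have hu : perFold key p (c, cd) ((code, info) :: tl) = perFold key p (c, cd) tl := by
            simp only [perFold, hg, if_neg hn, if_pos hl]
          simp only [hc, Bool.false_eq_true, if_false, hu]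
          exact ih c cd
        · have h4' : 4 ≤ (PySem.Chars.strip name.toList).length := by
            have : 4 ≤ PySem.Str.len (PySem.Str.strip name) := by omega
            simpa using this
          cases hin : PySem.Str.isIn (PySem.Str.lower (PySem.Str.strip name)) p.2 with
          | false =>
            have hin' : PySem.Chars.isIn (PySem.Chars.lower (PySem.Chars.strip name.toList))
                p.2.toList = false := by simpa using hin
            have hc : pvCondA p.2 key (code, info) = false := by simp [pvCondA, hg, hin']
            have hu : perFold key p (c, cd) ((code, info) :: tl) = perFold key p (c, cd) tl := by
              simp only [perFold, hg, if_neg hn, if_neg hl, hin, Bool.false_eq_true, if_false]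
            simp only [hc, Bool.false_eq_true, if_false, hu]
            exact ih c cd
          | true =>
            have hin' : PySem.Chars.isIn (PySem.Chars.lower (PySem.Chars.strip name.toList))
                p.2.toList = true := by simpa using hin
            have hc : pvCondA p.2 key (code, info) = true := by
              simp [pvCondA, hg, hn, h4', hin']
            have hu : perFold key p (c, cd) ((code, info) :: tl)
                = perFold key p (c + 1, some code) tl := by
              simp only [perFold, hg, if_neg hn, if_neg hl, hin, if_true]
            simp only [hc, if_true, hu]
            rw [ih (c + 1) (some code)]
            simp only [List.map_cons, List.length_cons, lastD, Prod.mk.injEq]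
            exact ⟨by omega, by first | rfl | trivial⟩

-- the resolution of one pending entry equals A's fallback-branch value for it
theorem resolve_one_eq (e : List (String × Option String)) (ds : String) (hds : ds ≠ "")
    (items : List (String × List (String × Option String))) :
    (let code := (if (perFold "site" (e, PySem.Str.lower ds) (0, none) items).1 = 1 then
          (perFold "site" (e, PySem.Str.lower ds) (0, none) items).2
        else if (perFold "kunde" (e, PySem.Str.lower ds) (0, none) items).1 = 1 then
          (perFold "kunde" (e, PySem.Str.lower ds) (0, none) items).2 else none)
     if pvTruthy code then
       (((pvToDict e).insert "project_code" code).insert "tag_source" (some "navn")).items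
     else ((pvToDict e).insert "tag_source" none).items) =
    (let m := matchPaaNavnA (some ds) items
     if pvTruthy m then
       (((pvToDict e).insert "project_code" m).insert "tag_source" (some "navn")).items
     else ((pvToDict e).insert "tag_source" none).items) := by
  have hs := perFold_spec "site" (e, PySem.Str.lower ds) items 0 none
  have hk := perFold_spec "kunde" (e, PySem.Str.lower ds) items 0 none
  simp only [matchPaaNavnA, if_neg hds, hs, hk]
  cases hS : (items.filter (pvCondA (PySem.Str.lower ds) "site")).map (·.1) with
  | nil =>
    cases hK : (items.filter (pvCondA (PySem.Str.lower ds) "kunde")).map (·.1) with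
    | nil => simp [lastD]
    | cons a t => cases t <;> simp [lastD]
  | cons a t =>
    cases t with
    | nil => simp [lastD]
    | cons b t' =>
      cases hK : (items.filter (pvCondA (PySem.Str.lower ds) "kunde")).map (·.1) with
      | nil => simp [lastD]
      | cons a' t'' => cases t'' <;> simp [lastD]

-- refilling the classified list with the per-pending resolutions = mapping over classified
theorem refill_filterMap
    (cs : List (Sum (List (String × Option String)) (List (String × Option String) × String)))
    (rf : List (String × Option String) × String → List (String × Option String)) :
    refillB cs ((cs.filterMap Sum.getRight?).map rf) = cs.map (Sum.elim id rf) := by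
  induction cs with
  | nil => rfl
  | cons hd tl ih =>
    cases hd with
    | inl d => simpa [refillB] using ih
    | inr p => simpa [refillB] using ih

-- resolveB over pending with its two per-entry hit maps is a single map over pending
theorem resolveB_map (pending : List (List (String × Option String) × String))
    (f g : List (String × Option String) × String → Nat × Option String) :
    resolveB pending (pending.map f) (pending.map g) =
      pending.map (fun p =>
        let code := if (f p).1 = 1 then (f p).2 else if (g p).1 = 1 then (g p).2 else none
        if pvTruthy code then
          (((pvToDict p.1).insert "project_code" code).insert "tag_source" (some "navn")).items
        else ((pvToDict p.1).insert "tag_source" none).items) := by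
  induction pending with
  | nil => rfl
  | cons p ps ih => simp only [List.map_cons, resolveB, ih]

-- classifyB's inl values are exactly applyTagA's values on the non-pending branches
theorem classify_inl (tagsD : PySem.Dict String (List (String × Option String)))
    (pm? : Option (List (String × List (String × Option String))))
    (e : List (String × Option String)) (d : List (String × Option String))
    (hd : classifyB tagsD pm? e = Sum.inl d) : d = applyTagA tagsD pm? e := by
  simp only [applyTagA]
  simp only [classifyB] at hd
  repeat' split at hd
  all_goals try (injection hd with hd; subst hd)
  all_goals simp_all [matchPaaNavnA, pvTruthy]

-- classifyB's inr values record the entry and lowered description of A's fallback branch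
theorem classify_inr (tagsD : PySem.Dict String (List (String × Option String)))
    (pm? : Option (List (String × List (String × Option String))))
    (e : List (String × Option String)) (p : List (String × Option String) × String)
    (hp : classifyB tagsD pm? e = Sum.inr p) :
    p.1 = e ∧ ∃ ds, ds ≠ "" ∧ p.2 = PySem.Str.lower ds ∧
      ∃ pm, pm? = some pm ∧ (PySem.Dict.ofList pm).size ≠ 0 ∧
      (((pvToDict e).get? "description").getD (some "")) = some ds ∧
      ¬ pvTruthy (((pvToDict e).get? "project_code").getD none) = true ∧
      (∀ g, (((pvToDict e).get? "entry_guid").getD none) = some g →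
        ¬ (g ≠ "" ∧ tagsD.contains g)) := by
  simp only [classifyB] at hp
  repeat' split at hp
  all_goals cases hp
  all_goals refine ⟨rfl, _, ?_, rfl, _, rfl, ?_, ?_, ?_, ?_⟩ <;>
    first | assumption | (intro g hg; simp_all)

-- A's fallback branch, isolated under the facts classifyB's inr case records
theorem applyTagA_pending (tagsD : PySem.Dict String (List (String × Option String)))
    (pm : List (String × List (String × Option String)))
    (e : List (String × Option String)) (ds : String)
    (hz : (PySem.Dict.ofList pm).size ≠ 0)
    (hdesc : (((pvToDict e).get? "description").getD (some "")) = some ds)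
    (hpc : ¬ pvTruthy (((pvToDict e).get? "project_code").getD none) = true)
    (hguid : ∀ g, (((pvToDict e).get? "entry_guid").getD none) = some g →
      ¬ (g ≠ "" ∧ tagsD.contains g)) :
    applyTagA tagsD (some pm) e =
      (let m := matchPaaNavnA (some ds) (PySem.Dict.ofList pm).items
       if pvTruthy m then
         (((pvToDict e).insert "project_code" m).insert "tag_source" (some "navn")).items
       else ((pvToDict e).insert "tag_source" none).items) := by
  unfold applyTagA
  cases hG : (((pvToDict e).get? "entry_guid").getD none) with
  | none => simp only [hG, if_neg hpc, if_pos hz, hdesc]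
  | some g => simp only [hG, if_neg (hguid g hG), if_neg hpc, if_pos hz, hdesc]

-- ===== VERDICT (by name: the statement is the Claim_ definition above) =====
theorem anvend_lokale_tags_py_spec : Claim_equal_anvend_lokale_tags_py := by
  intro entries tags pm? _
  unfold Spec_anvend_lokale_tags_py
  simp only [anvend_lokale_tags_py, anvend_lokale_tags_py_alt]
  by_cases hp : (entries.map (classifyB (PySem.Dict.ofList tags) pm?)).filterMap Sum.getRight? = []
  · rw [if_pos (by simp [List.isEmpty_iff, hp])]
    have h0 := refill_filterMap (entries.map (classifyB (PySem.Dict.ofList tags) pm?)) (fun _ => [])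
    rw [hp] at h0
    simp only [List.map_nil] at h0
    rw [h0, List.map_map]
    refine List.map_congr_left (fun e he => ?_)
    have hnone := (List.filterMap_eq_nil_iff.mp hp) _ (List.mem_map_of_mem he)
    cases hc : classifyB (PySem.Dict.ofList tags) pm? e with
    | inl d =>
      simp only [Function.comp_apply, hc, Sum.elim_inl, id]
      exact (classify_inl _ _ e d hc).symm
    | inr p => rw [hc] at hnone; simp [Sum.getRight?] at hnone
  · rw [if_neg (fun h => hp (List.isEmpty_iff.mp h))]
    -- a pending element exists, so projekt_map is a truthy dict
    obtain ⟨q, hq⟩ := List.exists_mem_of_ne_nil _ hp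
    obtain ⟨c, hc_mem, hcq⟩ := List.mem_filterMap.mp hq
    obtain ⟨e0, _, hce⟩ := List.mem_map.mp hc_mem
    have hcinr : classifyB (PySem.Dict.ofList tags) pm? e0 = Sum.inr q := by
      cases c with
      | inl d => simp [Sum.getRight?] at hcq
      | inr p => simp only [Sum.getRight?, Option.some.injEq] at hcq; rw [hce, hcq]
    obtain ⟨-, ds0, -, -, pm, hpm, hz, -⟩ := classify_inr _ _ e0 q hcinr
    subst hpm
    rw [taelHitsB_eq _ _ _ _ (by simp), taelHitsB_eq _ _ _ _ (by simp),
      zipWith_replicate_right, zipWith_replicate_right, resolveB_map, refill_filterMap,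
      List.map_map]
    refine List.map_congr_left (fun e he => ?_)
    cases hc : classifyB (PySem.Dict.ofList tags) (some pm) e with
    | inl d =>
      simp only [Function.comp_apply, hc, Sum.elim_inl, id]
      exact (classify_inl _ _ e d hc).symm
    | inr p =>
      obtain ⟨pe, plow⟩ := p
      simp only [Function.comp_apply, hc, Sum.elim_inr]
      obtain ⟨hp1, ds, hds, hp2, pm', hpm', hz', hdesc, hpc, hguid⟩ :=
        classify_inr _ _ e _ hc
      have hpe : pe = e := hp1
      have hplow : plow = PySem.Str.lower ds := hp2
      subst hpe; subst hplow
      cases hpm'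
      rw [applyTagA_pending (PySem.Dict.ofList tags) pm pe ds hz' hdesc hpc hguid]
      exact (resolve_one_eq pe ds hds (PySem.Dict.ofList pm).items).symm
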